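-- pv_equiv track=rewrite | github.com/halucinka/sudoku | sudoku.py | isSolutionUnclear
-- ===== SOURCE A (Python) =====
-- def isSolutionUnclear(possibleNumbers):
--     for i in range(9):
--         for j in range(9):
--             if (len(possibleNumbers[i][j]) < 1):
--                 return False #there is no solution
--     for i in range(9):
--         for j in range(9):
--             if (len(possibleNumbers[i][j]) > 1):
--                 return True
--     return False # there is exactly one solution
-- ===== SOURCE B (Python) =====
-- def isSolutionUnclear(possibleNumbers):
--     # Single fused pass with a flag instead of A's two separate nested scans:
--     # an empty cell anywhere still forces False, even after ambiguity was seen.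
--     ambiguous = False
--     for i in range(9):
--         for j in range(9):
--             n = len(possibleNumbers[i][j])
--             if n == 0:
--                 return False  # no solution
--             ambiguous = ambiguous or n > 1
--     return ambiguous
-- ===== Notes on version B (the rewrite author's own statement) =====
-- stated objective: simpler
-- what changed: Replaces A's two separate nested 9x9 scans (one for empty cells, one for ambiguous cells) with a single fused pass that carries an 'ambiguous' flag and returns False immediately at an empty cell.
import Mathlib
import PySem

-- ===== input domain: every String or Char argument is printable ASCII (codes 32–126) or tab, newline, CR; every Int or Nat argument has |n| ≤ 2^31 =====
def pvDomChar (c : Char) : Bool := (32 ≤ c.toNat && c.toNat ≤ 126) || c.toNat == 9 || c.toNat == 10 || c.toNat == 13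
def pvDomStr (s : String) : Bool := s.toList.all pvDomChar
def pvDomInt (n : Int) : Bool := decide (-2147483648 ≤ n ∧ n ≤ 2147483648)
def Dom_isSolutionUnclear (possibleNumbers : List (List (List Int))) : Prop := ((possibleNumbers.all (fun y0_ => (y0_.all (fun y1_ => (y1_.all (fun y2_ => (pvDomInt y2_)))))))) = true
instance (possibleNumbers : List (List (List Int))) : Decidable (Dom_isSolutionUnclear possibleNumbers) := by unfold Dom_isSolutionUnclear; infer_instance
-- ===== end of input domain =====

-- B fuses A's two separate nested 9x9 scans into one pass carrying an `ambiguous` flag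
-- (an empty cell still forces False even after ambiguity was seen); objective: simpler.

-- ===== PORT A =====
-- possibleNumbers[i][j]; Pre_ guarantees every access A performs is in range, so getD [] is
-- never the fabricated default on an access A's Python actually makes on admitted inputs.
def pvACell (possibleNumbers : List (List (List Int))) (i j : Int) : List Int :=
  (((PySem.List.pyGet? possibleNumbers i).getD []) |> (fun r => PySem.List.pyGet? r j)).getD []

-- each nested for-loop with an early `return` is the Boolean `any` of its condition
def isSolutionUnclear (possibleNumbers : List (List (List Int))) : Bool :=
  if (PySem.List.pyRange 0 9 1).any (fun i =>
       (PySem.List.pyRange 0 9 1).any (fun j => decide ((pvACell possibleNumbers i j).length < 1)))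
  then false  -- there is no solution
  else (PySem.List.pyRange 0 9 1).any (fun i =>
       (PySem.List.pyRange 0 9 1).any (fun j => decide (1 < (pvACell possibleNumbers i j).length)))

-- ===== PORT B =====
def pvBCell (possibleNumbers : List (List (List Int))) (i j : Int) : List Int :=
  (((PySem.List.pyGet? possibleNumbers i).getD []) |> (fun r => PySem.List.pyGet? r j)).getD []

-- the single fused loop, as structural recursion over the row-major (i, j) pairs with the flag as state
def pvBGo (possibleNumbers : List (List (List Int))) : List (Int × Int) → Bool → Bool
  | [], ambiguous => ambiguous
  | (i, j) :: rest, ambiguous =>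
      if (pvBCell possibleNumbers i j).length = 0 then false  -- no solution
      else pvBGo possibleNumbers rest (ambiguous || decide (1 < (pvBCell possibleNumbers i j).length))

def isSolutionUnclear_alt (possibleNumbers : List (List (List Int))) : Bool :=
  pvBGo possibleNumbers
    ((PySem.List.pyRange 0 9 1).flatMap (fun i => (PySem.List.pyRange 0 9 1).map (fun j => (i, j))))
    false

-- ===== PRECONDITION & SPEC =====
def pvProbe (possibleNumbers : List (List (List Int))) : List (Option (List Int)) :=
  (List.range 9).flatMap (fun i => (List.range 9).map (fun j =>
    possibleNumbers[i]? >>= fun r => r[j]?))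

-- Exactly the inputs on which Python A returns (no IndexError): scanning the 81 cell positions
-- row-major, the first "bad" probe (a missing position or an empty cell) is not a missing one.
def Pre_isSolutionUnclear (possibleNumbers : List (List (List Int))) : Prop :=
  (pvProbe possibleNumbers).find? (fun o => o.isNone || o == some []) ≠ some none
instance (possibleNumbers : List (List (List Int))) : Decidable (Pre_isSolutionUnclear possibleNumbers) := by unfold Pre_isSolutionUnclear; infer_instance

def pvWitness_isSolutionUnclear : List (List (List Int)) :=
  List.replicate 9 (List.replicate 9 [1])

def Spec_isSolutionUnclear (possibleNumbers : List (List (List Int))) (out : Bool) : Prop := out = isSolutionUnclear_alt possibleNumbers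
instance (possibleNumbers : List (List (List Int))) (out : Bool) : Decidable (Spec_isSolutionUnclear possibleNumbers out) := by unfold Spec_isSolutionUnclear; infer_instance

-- ===== CLAIM (what is proved, stated in full; the proofs are below) =====
def Claim_equal_isSolutionUnclear : Prop := ∀ (possibleNumbers : List (List (List Int))), Dom_isSolutionUnclear possibleNumbers → Pre_isSolutionUnclear possibleNumbers → Spec_isSolutionUnclear possibleNumbers (isSolutionUnclear possibleNumbers)

-- ===== LEMMAS AND PROOFS =====

-- the fused flag loop, characterised: first empty cell wins, otherwise the flag ends as "any > 1"
lemma pvBGo_eq (p : List (List (List Int))) (ps : List (Int × Int)) (amb : Bool) :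
    pvBGo p ps amb =
      (if ps.any (fun ij => decide ((pvBCell p ij.1 ij.2).length = 0)) then false
       else amb || ps.any (fun ij => decide (1 < (pvBCell p ij.1 ij.2).length))) := by
  induction ps generalizing amb with
  | nil => simp [pvBGo]
  | cons hd tl ih =>
      obtain ⟨i, j⟩ := hd
      simp only [pvBGo, List.any_cons]
      by_cases h : (pvBCell p i j).length = 0
      · simp [h]
      · rw [if_neg h, ih]
        by_cases h2 : tl.any (fun ij => decide ((pvBCell p ij.1 ij.2).length = 0)) = true
        · simp [h, Bool.or_assoc]
        · simp [h, Bool.or_assoc]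

-- ===== VERDICT (by name: the statement is the Claim_ definition above) =====
theorem isSolutionUnclear_spec : Claim_equal_isSolutionUnclear := by
  intro p _ _
  show isSolutionUnclear p = isSolutionUnclear_alt p
  unfold isSolutionUnclear isSolutionUnclear_alt
  rw [pvBGo_eq]
  have hc : pvBCell p = pvACell p := rfl
  rw [hc]
  simp [List.any_flatMap, List.any_map, Function.comp_def]
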